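-- pv_equiv track=rewrite | github.com/TridipKarmakar/Python_Assingment_IITM_Updated | week 8/8. OPPE_1_MAY_24_-_Set_1 and 2.py | longest_antakshari_subsequence
-- ===== SOURCE A (Python) =====
-- def longest_antakshari_subsequence(words: list) -> int:
--     max_length = 0
--     current_length = 1
--
--     # Traverse through the list of words to find the longest antakshari subsequence
--     for i in range(1, len(words)):
--         if words[i - 1][-1] == words[i][0]:  # Check if last letter matches the first letter of the next word
--             current_length += 1
--         else:
--             # Update max_length if current sub-sequence is longer
--             max_length = max(max_length, current_length)
--             current_length = 1  # Reset length for a new sequence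
--
--     # Final check to update max_length in case the longest sequence ends at the last word
--     max_length = max(max_length, current_length)
--
--     return max_length
-- ===== SOURCE B (Python) =====
-- def longest_antakshari_subsequence(words: list) -> int:
--     # Build a flag string: '1' where adjacent words chain, '0' where they don't,
--     # then the answer is 1 + the longest run of '1's (a group of the split on '0').
--     flags = ''.join('1' if a[-1] == b[0] else '0' for a, b in zip(words, words[1:]))
--     return 1 + max(len(run) for run in flags.split('0'))
-- ===== Notes on version B (the rewrite author's own statement) =====
-- stated objective: simpler
-- what changed: Replaces A's index loop with a running (max,current) counter pair by a two-step decomposition: build a '1'/'0' flag string of adjacent chain-matches, split it on '0', and return 1 + the longest group length.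
import Mathlib
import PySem

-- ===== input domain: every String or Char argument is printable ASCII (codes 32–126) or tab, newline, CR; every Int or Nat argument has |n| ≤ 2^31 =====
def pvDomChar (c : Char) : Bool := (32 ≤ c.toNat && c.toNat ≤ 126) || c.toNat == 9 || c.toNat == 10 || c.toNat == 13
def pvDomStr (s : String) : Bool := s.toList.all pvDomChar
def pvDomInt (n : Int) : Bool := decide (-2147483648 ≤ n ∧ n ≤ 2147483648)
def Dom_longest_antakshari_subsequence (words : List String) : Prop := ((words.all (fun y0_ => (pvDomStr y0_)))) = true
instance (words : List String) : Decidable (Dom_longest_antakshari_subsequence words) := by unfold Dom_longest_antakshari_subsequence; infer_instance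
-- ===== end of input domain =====

-- B replaces A's running-counter loop by: build a '1'/'0' flag string of adjacent
-- chain-matches, split it on '0', return 1 + the longest group length (simpler decomposition).

-- ===== PORT A =====
def longest_antakshari_subsequence (words : List String) : Int :=
  -- max_length = 0; current_length = 1; for i in range(1, len(words)): …
  let st :=
    (PySem.List.pyRange 1 (PySem.List.len words) 1).foldl
      (fun (mc : Int × Int) i =>
        if (PySem.Str.pyGet? (PySem.List.pyGetD words (i - 1) "") (-1))
             == (PySem.Str.pyGet? (PySem.List.pyGetD words i "") 0)
        then (mc.1, mc.2 + 1)
        else (max mc.1 mc.2, 1))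
      (0, 1)
  max st.1 st.2

-- ===== PORT B =====
def longest_antakshari_subsequence_alt (words : List String) : Int :=
  -- flags = ''.join('1' if a[-1] == b[0] else '0' for a, b in zip(words, words[1:]))
  let flags : String :=
    PySem.Str.join ""
      ((words.zip words.tail).map (fun p =>
        if (PySem.Str.pyGet? p.1 (-1)) == (PySem.Str.pyGet? p.2 0) then "1" else "0"))
  -- return 1 + max(len(run) for run in flags.split('0'))   (split list is never empty)
  let runs : List String := (PySem.Str.split? flags "0").getD []
  1 + (PySem.List.max? (runs.map (fun r => PySem.Str.len r)) (fun x => x)).getD 0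

-- ===== PRECONDITION & SPEC =====
-- A (and B) raise IndexError iff the list has at least two words and contains the
-- empty string (then some w[-1] / w[0] is taken on ""); exactly those inputs are excluded.
def Pre_longest_antakshari_subsequence (words : List String) : Prop :=
  words.length ≤ 1 ∨ "" ∉ words
instance (words : List String) : Decidable (Pre_longest_antakshari_subsequence words) := by
  unfold Pre_longest_antakshari_subsequence; infer_instance

def pvWitness_longest_antakshari_subsequence : List String := ["ab", "ba", "cd"]

def Spec_longest_antakshari_subsequence (words : List String) (out : Int) : Prop := out = longest_antakshari_subsequence_alt words
instance (words : List String) (out : Int) : Decidable (Spec_longest_antakshari_subsequence words out) := by unfold Spec_longest_antakshari_subsequence; infer_instance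

-- ===== CLAIM (what is proved, stated in full; the proofs are below) =====
def Claim_equal_longest_antakshari_subsequence : Prop := ∀ (words : List String), Dom_longest_antakshari_subsequence words → Pre_longest_antakshari_subsequence words → Spec_longest_antakshari_subsequence words (longest_antakshari_subsequence words)

-- ===== LEMMAS AND PROOFS =====

/-- A's loop step on one boolean flag (does the adjacent pair chain?). -/
def pvStepA (mc : Int × Int) (b : Bool) : Int × Int :=
  if b then (mc.1, mc.2 + 1) else (max mc.1 mc.2, 1)

/-- The chain flag of one adjacent pair. -/
def pvFlag (p : String × String) : Bool :=
  (PySem.Str.pyGet? p.1 (-1)) == (PySem.Str.pyGet? p.2 0)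

def pvFlags (ws : List String) : List Bool := (ws.zip ws.tail).map pvFlag

/-- Longest run ending value of A's scan: current run is `c`. -/
def pvMaxRun : Int → List Bool → Int
  | c, [] => c
  | c, true :: r => pvMaxRun (c + 1) r
  | c, false :: r => max c (pvMaxRun 1 r)

/-- Structural splitter on '0' (what `Chars.splitOn` computes for sep = "0"). -/
def pvSplit1 : List Char → List Char → List (List Char)
  | pre, [] => [pre]
  | pre, c :: r => if c = '0' then pre :: pvSplit1 [] r else pvSplit1 (pre ++ [c]) r

def pvFirst : List Char → List Char
  | [] => []
  | c :: r => if c = '0' then [] else c :: pvFirst r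

def pvRest : List Char → List (List Char)
  | [] => []
  | c :: r => if c = '0' then pvSplit1 [] r else pvRest r

def pvEncode (bs : List Bool) : List Char := bs.map (fun b => if b then '1' else '0')

lemma pvFoldRange {α β : Type} (zs : List α) (f : β → α → β) (g : β → Nat → β)
    (h : ∀ acc (k : Nat) (hk : k < zs.length), g acc k = f acc zs[k]) (init : β) :
    (List.range zs.length).foldl g init = zs.foldl f init := by
  induction zs using List.reverseRecOn generalizing init with
  | nil => simp
  | append_singleton zs z ih =>
      rw [List.length_append, List.length_singleton, List.range_succ,
        List.foldl_append, List.foldl_append]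
      rw [ih (fun acc k hk => by
        have := h acc k (by simpa using Nat.lt_succ_of_lt hk)
        rwa [List.getElem_append_left hk] at this)]
      have hz : g (zs.foldl f init) zs.length = f (zs.foldl f init) z := by
        have := h (zs.foldl f init) zs.length (by simp)
        simpa using this
      simp only [List.foldl_cons, List.foldl_nil, hz]

/-- A's index loop equals the fold of `pvStepA` over the adjacent-pair flags. -/
lemma pvL1 (ws : List String) (m c : Int) :
    (PySem.List.pyRange 1 (PySem.List.len ws) 1).foldl
      (fun (mc : Int × Int) i =>
        if (PySem.Str.pyGet? (PySem.List.pyGetD ws (i - 1) "") (-1))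
             == (PySem.Str.pyGet? (PySem.List.pyGetD ws i "") 0)
        then (mc.1, mc.2 + 1)
        else (max mc.1 mc.2, 1))
      (m, c)
    = (pvFlags ws).foldl pvStepA (m, c) := by
  have hlen : ((PySem.List.len ws : Int) - 1).toNat = (ws.zip ws.tail).length := by
    simp only [PySem.List.len, List.length_zip, List.length_tail]
    omega
  rw [PySem.List.pyRange_one, hlen, List.foldl_map]
  unfold pvFlags
  rw [List.foldl_map]
  apply pvFoldRange
  intro acc k hk
  have hk1 : k < ws.length := by
    have := hk; rw [List.length_zip, List.length_tail] at this; omega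
  have hk2 : k + 1 < ws.length := by
    have := hk; rw [List.length_zip, List.length_tail] at this; omega
  have e1 : (1 : Int) + (k : Int) - 1 = ((k : Nat) : Int) := by ring
  have e2 : (1 : Int) + (k : Int) = (((k + 1 : Nat)) : Int) := by push_cast; ring
  rw [e1, e2, PySem.List.pyGetD_natCast, PySem.List.pyGetD_natCast,
    List.getD_eq_getElem ws "" hk1, List.getD_eq_getElem ws "" hk2]
  simp [pvStepA, pvFlag, List.getElem_zip, List.getElem_tail]

/-- A's fold with accumulator `(m, c)` computes `max m (pvMaxRun c bs)`. -/
lemma pvL2 (bs : List Bool) (m c : Int) :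
    max ((bs.foldl pvStepA (m, c)).1) ((bs.foldl pvStepA (m, c)).2)
      = max m (pvMaxRun c bs) := by
  induction bs generalizing m c with
  | nil => simp [pvMaxRun]
  | cons b r ih =>
      cases b with
      | true => simpa [pvStepA, pvMaxRun] using ih m (c + 1)
      | false =>
          simp only [List.foldl_cons, pvStepA, pvMaxRun]
          rw [if_neg (by simp), ih (max m c) 1]
          simp [max_assoc]

lemma pvMaxRun_ge (bs : List Bool) : ∀ c : Int, c ≤ pvMaxRun c bs := by
  induction bs with
  | nil => intro c; simp [pvMaxRun]
  | cons b r ih =>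
      intro c
      cases b with
      | true => exact le_trans (by omega) (ih (c + 1))
      | false => simp [pvMaxRun]

/-- `Chars.splitOn.go` with sep "0" and enough fuel is the structural splitter. -/
lemma pvGo (fuel : Nat) : ∀ (l cur : List Char) (acc : List (List Char)), l.length < fuel →
    PySem.Chars.splitOn.go ['0'] fuel l cur acc = acc.reverse ++ pvSplit1 cur.reverse l := by
  induction fuel with
  | zero => intro l cur acc h; omega
  | succ f ih =>
      intro l cur acc h
      cases l with
      | nil => simp [PySem.Chars.splitOn.go, pvSplit1]
      | cons c rest =>
          by_cases hc : c = '0'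
          · subst hc
            rw [show PySem.Chars.splitOn.go ['0'] (f + 1) ('0' :: rest) cur acc
                  = PySem.Chars.splitOn.go ['0'] f rest [] (cur.reverse :: acc) from by
              simp [PySem.Chars.splitOn.go, List.isPrefixOf]]
            rw [ih rest [] (cur.reverse :: acc) (by simpa using Nat.lt_of_succ_lt_succ h)]
            simp [pvSplit1]
          · rw [show PySem.Chars.splitOn.go ['0'] (f + 1) (c :: rest) cur acc
                  = PySem.Chars.splitOn.go ['0'] f rest (c :: cur) acc from by
              simp only [PySem.Chars.splitOn.go, List.isPrefixOf]
              simp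
              intro h0
              exact absurd h0.symm hc]
            rw [ih rest (c :: cur) acc (by simpa using Nat.lt_of_succ_lt_succ h)]
            simp [pvSplit1, hc]

lemma pvSplitOn_eq (cs : List Char) :
    PySem.Chars.splitOn cs ['0'] = pvSplit1 [] cs := by
  unfold PySem.Chars.splitOn
  rw [pvGo (cs.length + 1) cs [] [] (by omega)]
  simp

lemma pvSplit1_eq (l : List Char) : ∀ pre, pvSplit1 pre l = (pre ++ pvFirst l) :: pvRest l := by
  induction l with
  | nil => intro pre; simp [pvSplit1, pvFirst, pvRest]
  | cons c r ih =>
      intro pre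
      by_cases hc : c = '0'
      · subst hc; simp [pvSplit1, pvFirst, pvRest]
      · simp only [pvSplit1, pvFirst, pvRest, if_neg hc, ih (pre ++ [c])]
        simp

lemma pvFoldlMax (l : List Int) : ∀ c x : Int,
    l.foldl max (max c x) = max c (l.foldl max x) := by
  induction l with
  | nil => intro c x; simp
  | cons y t ih =>
      intro c x
      simp only [List.foldl_cons, max_assoc]
      exact ih c (max x y)

/-- `pvMaxRun` as a fold over the group lengths of the encoded flag string. -/
lemma pvL4 (bs : List Bool) : ∀ c : Int,
    pvMaxRun c bs
      = ((pvRest (pvEncode bs)).map (fun g => 1 + (g.length : Int))).foldl max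
          (c + ((pvFirst (pvEncode bs)).length : Int)) := by
  induction bs with
  | nil => intro c; simp [pvMaxRun, pvEncode, pvFirst, pvRest]
  | cons b r ih =>
      intro c
      cases b with
      | true =>
          have he : pvEncode (true :: r) = '1' :: pvEncode r := rfl
          rw [he]
          simp only [pvMaxRun, pvFirst, pvRest, if_neg (by decide : ¬ ('1' : Char) = '0')]
          rw [ih (c + 1)]
          congr 1
          simp only [List.length_cons]
          push_cast
          ring
      | false =>
          have he : pvEncode (false :: r) = '0' :: pvEncode r := rfl
          have hf : pvFirst ('0' :: pvEncode r) = [] := by simp [pvFirst]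
          have hr : pvRest ('0' :: pvEncode r) = pvSplit1 [] (pvEncode r) := by simp [pvRest]
          rw [he, hf, hr, pvSplit1_eq (pvEncode r) [],
            show pvMaxRun c (false :: r) = max c (pvMaxRun 1 r) from rfl, ih 1]
          simp only [List.nil_append, List.map_cons, List.foldl_cons, List.length_nil,
            Nat.cast_zero, add_zero]
          exact (pvFoldlMax _ c _).symm

lemma pvFoldlShift (l : List Int) : ∀ x : Int,
    (l.map (fun y => 1 + y)).foldl max (1 + x) = 1 + l.foldl max x := by
  induction l with
  | nil => intro x; simp
  | cons y t ih =>
      intro x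
      simp only [List.map_cons, List.foldl_cons]
      rw [show max (1 + x) (1 + y) = 1 + max x y by omega, ih (max x y)]

/-- The flag string B builds decodes to `pvEncode` of the flag list. -/
lemma pvFlagsString (ws : List String) :
    (PySem.Str.join ""
      ((ws.zip ws.tail).map (fun p =>
        if (PySem.Str.pyGet? p.1 (-1)) == (PySem.Str.pyGet? p.2 0) then "1" else "0"))).toList
    = pvEncode (pvFlags ws) := by
  rw [PySem.Str.toList_join]
  have h1 : (List.map String.toList
        ((ws.zip ws.tail).map (fun p =>
          if (PySem.Str.pyGet? p.1 (-1)) == (PySem.Str.pyGet? p.2 0) then "1" else "0")))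
      = (pvEncode (pvFlags ws)).map (fun c => [c]) := by
    unfold pvEncode pvFlags pvFlag
    simp only [List.map_map]
    apply List.map_congr_left
    intro p _
    by_cases hq : PySem.List.pyGet? p.1.toList (-1) = PySem.List.pyGet? p.2.toList 0 <;>
      simp [hq]
  rw [h1]
  have : ("" : String).toList = [] := rfl
  rw [this, PySem.Chars.join_nil_singletons]

-- ===== VERDICT (by name: the statement is the Claim_ definition above) =====
theorem longest_antakshari_subsequence_spec : Claim_equal_longest_antakshari_subsequence := by
  intro words _ _
  unfold Spec_longest_antakshari_subsequence
  unfold longest_antakshari_subsequence longest_antakshari_subsequence_alt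
  simp only []
  rw [pvL1 words 0 1, pvL2 (pvFlags words) 0 1]
  set flags := PySem.Str.join ""
      ((words.zip words.tail).map (fun p =>
        if (PySem.Str.pyGet? p.1 (-1)) == (PySem.Str.pyGet? p.2 0) then "1" else "0")) with hflags
  have hfl : flags.toList = pvEncode (pvFlags words) := by
    rw [hflags]; exact pvFlagsString words
  have hmap := PySem.Str.split?_map flags "0"
  have hz : ("0" : String).toList = ['0'] := rfl
  rw [hz] at hmap
  have hchars : PySem.Chars.split? flags.toList ['0'] = some (pvSplit1 [] flags.toList) := by
    simp [PySem.Chars.split?, pvSplitOn_eq]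
  rw [hchars] at hmap
  obtain ⟨runs, hruns, hrunsmap⟩ := Option.map_eq_some_iff.mp hmap
  rw [hruns]
  simp only [Option.getD_some]
  have hlens : runs.map (fun r => PySem.Str.len r)
      = (pvSplit1 [] flags.toList).map (fun cs => (cs.length : Int)) := by
    rw [← hrunsmap, List.map_map]
    apply List.map_congr_left
    intro r _
    simp [PySem.Str.len_eq, Function.comp]
  rw [hfl, pvSplit1_eq (pvEncode (pvFlags words)) []] at hlens
  simp only [List.nil_append, List.map_cons] at hlens
  rw [hlens, PySem.List.max?_id_cons]
  simp only [Option.getD_some]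
  rw [pvL4 (pvFlags words) 1]
  have hmr := pvMaxRun_ge (pvFlags words) 1
  rw [pvL4 (pvFlags words) 1] at hmr
  have hshift := pvFoldlShift
      ((pvRest (pvEncode (pvFlags words))).map (fun g => (g.length : Int)))
      ((pvFirst (pvEncode (pvFlags words))).length : Int)
  rw [List.map_map] at hshift
  have hcomp : ((fun y => 1 + y) ∘ fun (g : List Char) => (g.length : Int))
      = fun g => 1 + (g.length : Int) := rfl
  rw [hcomp] at hshift
  rw [hshift]
  omega
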